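-- pv_equiv track=rewrite | github.com/YooGunWook/coding_test | 프로그래머스/모음 사전.py | solution
-- ===== SOURCE A (Python) =====
-- def solution(word):
--     answer = 0
--     word_dict = {"E": 1, "I": 2, "O": 3, "U": 4}
--     for i in range(len(word)):
--         if word[i] == 'A':
--             answer += 1
--         else:
--             for j in range(4, i, -1):
--                 answer += (5 **(j-i)) * word_dict[word[i]]
--             answer += word_dict[word[i]] + 1
--     return answer
-- ===== SOURCE B (Python) =====
-- def solution(word):
--     idx = {"A": 0, "E": 1, "I": 2, "O": 3, "U": 4}
--     total = 0
--     for i, c in enumerate(word):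
--         weight = (5 ** (5 - i) - 1) // 4 if i < 4 else 1
--         total += idx[c] * weight + 1
--     return total
-- ===== Notes on version B (the rewrite author's own statement) =====
-- stated objective: simpler
-- what changed: Replaced A's per-character nested countdown loop (adding 5^(j-i)*value term by term) with a single flat pass that adds idx[c] * precomputed positional weight ((5^(5-i)-1)//4 for i<4, else 1) + 1 per character.
-- outside the precondition, e.g. on solution('AXE'): A raises KeyError, B raises KeyError
import Mathlib
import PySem

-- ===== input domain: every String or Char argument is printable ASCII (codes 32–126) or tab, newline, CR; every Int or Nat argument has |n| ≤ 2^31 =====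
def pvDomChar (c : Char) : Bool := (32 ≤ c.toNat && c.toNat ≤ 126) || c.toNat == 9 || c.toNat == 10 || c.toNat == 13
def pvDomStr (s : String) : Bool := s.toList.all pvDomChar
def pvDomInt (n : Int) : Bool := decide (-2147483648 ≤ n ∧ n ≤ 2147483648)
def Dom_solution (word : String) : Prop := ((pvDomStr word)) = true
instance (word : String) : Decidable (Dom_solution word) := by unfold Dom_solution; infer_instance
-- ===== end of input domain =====

-- B replaces A's nested countdown loop by a single pass adding idx[c] * (precomputed positional weight) + 1; objective: simpler (same O(n) cost).

-- ===== PORT A =====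
-- word_dict of A (a dict literal in the Python source)
def wordDictA : PySem.Dict Char Int :=
  PySem.Dict.ofList [('E', 1), ('I', 2), ('O', 3), ('U', 4)]

def solution (word : String) : Int :=
  (PySem.List.pyRange 0 (PySem.Str.len word) 1).foldl
    (fun answer i =>
      if PySem.List.pyGetD word.toList i ' ' = 'A' then
        answer + 1
      else
        -- word_dict[word[i]]: KeyError (= none) is excluded by Pre_solution
        let v := (wordDictA.get? (PySem.List.pyGetD word.toList i ' ')).getD 0
        let answer := (PySem.List.pyRange 4 i (-1)).foldl
          (fun answer j => answer + 5 ^ (j - i).toNat * v) answer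
        answer + v + 1)
    0

-- ===== PORT B =====
-- idx of B (a dict literal in Source B)
def idxB : PySem.Dict Char Int :=
  PySem.Dict.ofList [('A', 0), ('E', 1), ('I', 2), ('O', 3), ('U', 4)]

def solution_alt (word : String) : Int :=
  (PySem.List.enumerate word.toList).foldl
    (fun total p =>
      let weight : Int :=
        if p.1 < 4 then PySem.Int.floordiv (5 ^ (5 - p.1).toNat - 1) 4 else 1
      total + ((idxB.get? p.2).getD 0) * weight + 1)
    0

-- ===== PRECONDITION & SPEC =====
-- Pre_ excludes exactly the words containing a non-vowel character: there BOTH Pythons raise KeyError.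
def Pre_solution (word : String) : Prop :=
  (word.toList.all (fun c => decide (c ∈ ['A', 'E', 'I', 'O', 'U']))) = true
instance (word : String) : Decidable (Pre_solution word) := by unfold Pre_solution; infer_instance

def pvWitness_solution : String := "E"

def Spec_solution (word : String) (out : Int) : Prop := out = solution_alt word
instance (word : String) (out : Int) : Decidable (Spec_solution word out) := by unfold Spec_solution; infer_instance

-- ===== CLAIM (what is proved, stated in full; the proofs are below) =====
def Claim_equal_solution : Prop := ∀ (word : String), Dom_solution word → Pre_solution word → Spec_solution word (solution word)

-- ===== LEMMAS AND PROOFS =====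

-- A's index loop 'for i in range(len(xs)): … xs[i] …' is the fold over enumerate of the same body.
theorem foldl_idx_eq_enum {α β : Type} (d : α) (F : β → Int → α → β) :
    ∀ (cs pre : List α) (init : β),
      (PySem.List.pyRange (pre.length : Int) ((pre.length : Int) + (cs.length : Int)) 1).foldl
          (fun a i => F a i (PySem.List.pyGetD (pre ++ cs) i d)) init
        = (PySem.List.enumerate cs (pre.length : Int)).foldl (fun a p => F a p.1 p.2) init := by
  intro cs
  induction cs with
  | nil =>
      intro pre init
      simp [PySem.List.pyRange_one_eq_nil, PySem.List.enumerate]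
  | cons c cs ih =>
      intro pre init
      rw [PySem.List.pyRange_one_cons (by push_cast [List.length_cons]; omega)]
      rw [List.foldl_cons, PySem.List.enumerate_cons, List.foldl_cons]
      have hget : PySem.List.pyGetD (pre ++ c :: cs) (pre.length : Int) d = c := by
        simp [PySem.List.pyGetD_natCast, List.getD]
      rw [hget]
      have h := ih (pre ++ [c]) (F init (pre.length : Int) c)
      have e1 : (((pre ++ [c]).length : Nat) : Int) = (pre.length : Int) + 1 := by
        simp
      have e2 : ((pre.length : Int) + 1) + (cs.length : Int)
          = (pre.length : Int) + ((c :: cs).length : Int) := by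
        simp; ring
      rw [e1, e2, List.append_assoc] at h
      simpa using h

theorem mem_enum_facts {α : Type} :
    ∀ (xs : List α) (s : Int) (p : Int × α),
      p ∈ PySem.List.enumerate xs s → s ≤ p.1 ∧ p.2 ∈ xs := by
  intro xs
  induction xs with
  | nil => intro s p hp; simp [PySem.List.enumerate] at hp
  | cons x xs ih =>
      intro s p hp
      rw [PySem.List.enumerate_cons] at hp
      rcases List.mem_cons.mp hp with h | h
      · subst h; simp
      · have := ih (s + 1) p h
        exact ⟨by omega, List.mem_cons_of_mem _ this.2⟩

-- ===== VERDICT (by name: the statement is the Claim_ definition above) =====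
theorem solution_spec : Claim_equal_solution := by
  intro word _ hpre
  unfold Spec_solution solution solution_alt
  rw [PySem.Str.len_eq]
  have h0 := foldl_idx_eq_enum ' '
    (fun (a : Int) (i : Int) (c : Char) =>
      if c = 'A' then a + 1
      else
        (PySem.List.pyRange 4 i (-1)).foldl
            (fun answer j => answer + 5 ^ (j - i).toNat * ((wordDictA.get? c).getD 0)) a
          + (wordDictA.get? c).getD 0 + 1)
    word.toList [] (0 : Int)
  simp only [List.length_nil, Nat.cast_zero, List.nil_append, zero_add] at h0
  rw [h0]
  apply PySem.List.foldl_congr_mem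
  intro acc p hp
  obtain ⟨hi, hc⟩ := mem_enum_facts word.toList 0 p hp
  have hv : p.2 ∈ ['A', 'E', 'I', 'O', 'U'] := of_decide_eq_true (List.all_eq_true.mp hpre p.2 hc)
  obtain ⟨i, c⟩ := p
  simp only at hi hv ⊢
  have eA : ((idxB.get? 'A').getD 0 : Int) = 0 := by decide
  have eE : ((idxB.get? 'E').getD 0 : Int) = 1 := by decide
  have eI : ((idxB.get? 'I').getD 0 : Int) = 2 := by decide
  have eO : ((idxB.get? 'O').getD 0 : Int) = 3 := by decide
  have eU : ((idxB.get? 'U').getD 0 : Int) = 4 := by decide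
  have wE : ((wordDictA.get? 'E').getD 0 : Int) = 1 := by decide
  have wI : ((wordDictA.get? 'I').getD 0 : Int) = 2 := by decide
  have wO : ((wordDictA.get? 'O').getD 0 : Int) = 3 := by decide
  have wU : ((wordDictA.get? 'U').getD 0 : Int) = 4 := by decide
  have g0 : PySem.Int.floordiv (5 ^ ((5:Int) - 0).toNat - 1) 4 = 781 := by decide
  have g1 : PySem.Int.floordiv (5 ^ ((5:Int) - 1).toNat - 1) 4 = 156 := by decide
  have g2 : PySem.Int.floordiv (5 ^ ((5:Int) - 2).toNat - 1) 4 = 31 := by decide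
  have g3 : PySem.Int.floordiv (5 ^ ((5:Int) - 3).toNat - 1) 4 = 6 := by decide
  have r0 : PySem.List.pyRange 4 0 (-1) = [4, 3, 2, 1] := by decide
  have r1 : PySem.List.pyRange 4 1 (-1) = [4, 3, 2] := by decide
  have r2 : PySem.List.pyRange 4 2 (-1) = [4, 3] := by decide
  have r3 : PySem.List.pyRange 4 3 (-1) = [4] := by decide
  have t2 : (2 : Int).toNat = 2 := by decide
  have t3 : (3 : Int).toNat = 3 := by decide
  have t4 : (4 : Int).toNat = 4 := by decide
  by_cases h4 : i < 4
  · interval_cases i <;> fin_cases hv <;>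
      simp only [wE, wI, wO, wU, eA, eE, eI, eO, eU, g0, g1, g2, g3, r0, r1, r2, r3,
        List.foldl_cons, List.foldl_nil] <;>
      norm_num [t2, t3, t4] <;>
      first
        | decide
        | (rw [if_neg (by decide)]; ring)
  · rw [PySem.List.pyRange_neg_one_eq_nil (by omega)]
    fin_cases hv <;>
      simp only [wE, wI, wO, wU, eA, eE, eI, eO, eU, List.foldl_nil, if_neg h4] <;>
      norm_num <;> decide
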